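-- pv_equiv track=rewrite | github.com/Prajwalk09/FIT9136-Assignments | Assignment 3/Task 6/task6.py | win_loss_by_opening
-- ===== SOURCE A (Python) =====
-- def win_loss_by_opening(games: list[dict]) -> dict:
--     opening_statistics = {}
--
--     for game in games:
--         opening = game['opening']
--         result = game['result']
--
--         if opening not in opening_statistics:
--             opening_statistics[opening] = [0, 0]
--
--         white_win, black_win, draw = '1-0', '0-1', '1/2-1/2'
--
--         if result == white_win:
--             opening_statistics[opening][0] += 1
--         elif result == black_win:
--             opening_statistics[opening][1] += 1
--
--     return {opening: (counts[0], counts[1]) for opening, counts in opening_statistics.items()}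
-- ===== SOURCE B (Python) =====
-- def win_loss_by_opening(games: list[dict]) -> dict:
--     groups = {}
--     for game in games:
--         groups.setdefault(game['opening'], []).append(game['result'])
--     return {opening: (results.count('1-0'), results.count('0-1'))
--             for opening, results in groups.items()}
-- ===== Notes on version B (the rewrite author's own statement) =====
-- stated objective: alternative
-- what changed: B groups raw result strings per opening in one pass (setdefault+append) and then counts '1-0'/'0-1' with list.count in a dict comprehension, instead of A's incremental [white,black] counter cells mutated inside the loop.
import Mathlib
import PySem

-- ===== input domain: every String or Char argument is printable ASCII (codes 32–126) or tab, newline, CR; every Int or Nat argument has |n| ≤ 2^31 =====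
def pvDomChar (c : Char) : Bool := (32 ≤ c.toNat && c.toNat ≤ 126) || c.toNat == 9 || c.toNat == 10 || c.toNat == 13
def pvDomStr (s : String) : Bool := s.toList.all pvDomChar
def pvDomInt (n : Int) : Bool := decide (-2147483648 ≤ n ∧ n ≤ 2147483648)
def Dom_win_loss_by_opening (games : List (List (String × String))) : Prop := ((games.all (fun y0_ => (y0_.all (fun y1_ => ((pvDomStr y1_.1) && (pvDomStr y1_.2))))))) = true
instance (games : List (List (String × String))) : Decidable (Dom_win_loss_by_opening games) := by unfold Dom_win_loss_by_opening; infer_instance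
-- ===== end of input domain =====

-- B groups the raw result strings per opening in one pass and then counts '1-0'/'0-1'
-- per group, instead of A's incremental [white,black] counter cells mutated in the loop.

-- game['k'] (missing keys are excluded by Pre_, so the "" default is never read there)
def pvLook (g : List (String × String)) (k : String) : String :=
  ((PySem.Dict.mk g).get? k).getD ""

-- ===== PORT A =====
def win_loss_by_opening (games : List (List (String × String))) : List (String × Int × Int) :=
  let stats := games.foldl (fun d game =>
    let opening := pvLook game "opening"
    let result := pvLook game "result"
    let d := if d.contains opening then d else d.insert opening ((0 : Int), (0 : Int))
    if result == "1-0" then d.modify opening (0, 0) (fun c => (c.1 + 1, c.2))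
    else if result == "0-1" then d.modify opening (0, 0) (fun c => (c.1, c.2 + 1))
    else d) PySem.Dict.empty
  stats.items.map (fun p => (p.1, (p.2.1, p.2.2)))

-- ===== PORT B =====
def win_loss_by_opening_alt (games : List (List (String × String))) : List (String × Int × Int) :=
  let groups := games.foldl (fun d game =>
    d.modify (pvLook game "opening") [] (· ++ [pvLook game "result"])) PySem.Dict.empty
  groups.items.map (fun p =>
    (p.1, ((p.2.count "1-0" : Int), (p.2.count "0-1" : Int))))

-- ===== PRECONDITION & SPEC =====
-- Pre_: every game has the keys 'opening' and 'result'; on any other input A raises KeyError.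
def Pre_win_loss_by_opening (games : List (List (String × String))) : Prop :=
  ∀ game ∈ games, (PySem.Dict.mk game).contains "opening" = true ∧
                  (PySem.Dict.mk game).contains "result" = true
instance (games : List (List (String × String))) : Decidable (Pre_win_loss_by_opening games) := by
  unfold Pre_win_loss_by_opening; infer_instance

def pvWitness_win_loss_by_opening : (List (List (String × String))) :=
  [[("opening", "Sicilian"), ("result", "1-0")], [("opening", "Sicilian"), ("result", "1/2-1/2")]]

def Spec_win_loss_by_opening (games : List (List (String × String))) (out : List (String × Int × Int)) : Prop := out = win_loss_by_opening_alt games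
instance (games : List (List (String × String))) (out : List (String × Int × Int)) : Decidable (Spec_win_loss_by_opening games out) := by unfold Spec_win_loss_by_opening; infer_instance

-- ===== CLAIM (what is proved, stated in full; the proofs are below) =====
def Claim_equal_win_loss_by_opening : Prop := ∀ (games : List (List (String × String))), Dom_win_loss_by_opening games → Pre_win_loss_by_opening games → Spec_win_loss_by_opening games (win_loss_by_opening games)

-- ===== LEMMAS AND PROOFS =====

-- A's per-game step, rephrased over the already-extracted (opening, result) pair
def stepA (d : PySem.Dict String (Int × Int)) (p : String × String) : PySem.Dict String (Int × Int) :=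
  let d := if d.contains p.1 then d else d.insert p.1 ((0 : Int), (0 : Int))
  if p.2 == "1-0" then d.modify p.1 (0, 0) (fun c => (c.1 + 1, c.2))
  else if p.2 == "0-1" then d.modify p.1 (0, 0) (fun c => (c.1, c.2 + 1))
  else d

lemma set_contains_keys (d : PySem.Dict String (Int × Int)) (k : String) :
    PySem.Set.contains d.keys k = d.contains k := by
  simp [PySem.Set.contains, PySem.Dict.contains_eq_decide_mem_keys]

lemma keys_stepA (d : PySem.Dict String (Int × Int)) (p : String × String) :
    (stepA d p).keys = PySem.Set.add d.keys p.1 := by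
  unfold stepA PySem.Set.add
  rw [set_contains_keys]
  by_cases hc : d.contains p.1 = true
  · simp only [hc, if_true]
    split_ifs <;> try rfl
    all_goals rw [PySem.Dict.keys_modify, PySem.Dict.keys_insert_of_contains _ _ hc]
  · simp only [Bool.not_eq_true] at hc
    simp only [hc, Bool.false_eq_true, if_false]
    have h1 : (d.insert p.1 ((0:Int),(0:Int))).contains p.1 = true :=
      PySem.Dict.contains_insert_self _ _ _
    have hk := PySem.Dict.keys_insert_of_not_contains d ((0:Int),(0:Int)) hc
    split_ifs <;> simp [PySem.Dict.keys_modify, PySem.Dict.keys_insert_of_contains _ _ h1, hk]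

lemma nodup_keys_stepA (d : PySem.Dict String (Int × Int)) (p : String × String)
    (h : d.keys.Nodup) : (stepA d p).keys.Nodup := by
  rw [keys_stepA]
  unfold PySem.Set.add
  split_ifs with hc
  · exact h
  · simp only [PySem.Set.contains, List.contains_iff_mem] at hc
    rw [List.nodup_append]
    refine ⟨h, List.nodup_singleton _, fun a ha b hb => ?_⟩
    simp only [List.mem_singleton] at hb
    exact fun he => hc (by rw [← hb, ← he]; exact ha)

lemma keys_foldA (l : List (String × String)) (d : PySem.Dict String (Int × Int)) :
    (l.foldl stepA d).keys = PySem.Set.update d.keys (l.map (·.1)) := by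
  induction l generalizing d with
  | nil => rfl
  | cons p l ih =>
      simp only [List.foldl_cons, List.map_cons]
      rw [ih, keys_stepA]
      rfl

lemma nodup_keys_foldA (l : List (String × String)) (d : PySem.Dict String (Int × Int))
    (h : d.keys.Nodup) : (l.foldl stepA d).keys.Nodup := by
  induction l generalizing d with
  | nil => exact h
  | cons p l ih => exact ih _ (nodup_keys_stepA _ _ h)

lemma getD_stepA (d : PySem.Dict String (Int × Int)) (p : String × String) (k : String) :
    (stepA d p).getD k (0, 0) =
      if k = p.1 then
        (if p.2 == "1-0" then ((d.getD k (0,0)).1 + 1, (d.getD k (0,0)).2)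
         else if p.2 == "0-1" then ((d.getD k (0,0)).1, (d.getD k (0,0)).2 + 1)
         else d.getD k (0,0))
      else d.getD k (0, 0) := by
  unfold stepA
  have hins : ∀ k', (if d.contains p.1 then d else d.insert p.1 ((0:Int),(0:Int))).getD k' (0,0)
      = d.getD k' (0,0) := by
    intro k'
    split_ifs with hc
    · rfl
    · rw [PySem.Dict.getD_insert]
      split_ifs with he
      · rw [he, PySem.Dict.getD_of_not_contains _ _ (by simpa using hc)]
      · rfl
  by_cases h1 : (p.2 == "1-0") = true
  · simp only [h1, if_true, PySem.Dict.getD_modify, hins]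
    split_ifs with hk <;> simp [hk]
  · by_cases h2 : (p.2 == "0-1") = true
    · simp only [h1, h2, if_true, Bool.false_eq_true, if_false, PySem.Dict.getD_modify, hins]
      split_ifs with hk <;> simp [hk]
    · simp only [h1, h2, Bool.false_eq_true, if_false, hins]
      split_ifs <;> rfl

lemma getD_foldA (l : List (String × String)) (d : PySem.Dict String (Int × Int)) (k : String) :
    (l.foldl stepA d).getD k (0, 0) =
      ((d.getD k (0,0)).1 + (((l.filter (·.1 == k)).map (·.2)).count "1-0" : Int),
       (d.getD k (0,0)).2 + (((l.filter (·.1 == k)).map (·.2)).count "0-1" : Int)) := by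
  induction l generalizing d with
  | nil => simp
  | cons p l ih =>
      simp only [List.foldl_cons, List.filter_cons]
      rw [ih, getD_stepA]
      by_cases hk : k = p.1
      · have : (p.1 == k) = true := by simp [hk]
        simp only [hk, if_true, this, List.map_cons]
        by_cases h1 : p.2 = "1-0"
        · simp [h1]; ring
        · by_cases h2 : p.2 = "0-1"
          · simp [h1, h2]; ring
          · simp [h1, h2, Ne.symm]
      · have : (p.1 == k) = false := by
          simp only [beq_eq_false_iff_ne]; exact fun h => hk h.symm
        simp [hk, this]

theorem winloss_eq (games : List (List (String × String))) :
    win_loss_by_opening games = win_loss_by_opening_alt games := by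
  unfold win_loss_by_opening win_loss_by_opening_alt
  have hA : games.foldl (fun d game =>
      let opening := pvLook game "opening"
      let result := pvLook game "result"
      let d := if d.contains opening then d else d.insert opening ((0 : Int), (0 : Int))
      if result == "1-0" then d.modify opening (0, 0) (fun c => (c.1 + 1, c.2))
      else if result == "0-1" then d.modify opening (0, 0) (fun c => (c.1, c.2 + 1))
      else d) PySem.Dict.empty
    = (games.map (fun g => (pvLook g "opening", pvLook g "result"))).foldl stepA PySem.Dict.empty := by
    rw [List.foldl_map]; rfl
  have hB : games.foldl (fun d game =>
      d.modify (pvLook game "opening") [] (· ++ [pvLook game "result"])) PySem.Dict.empty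
    = (games.map (fun g => (pvLook g "opening", pvLook g "result"))).foldl
        (fun d p => d.modify p.1 [] (· ++ [p.2])) PySem.Dict.empty := by
    rw [List.foldl_map]
  simp only [hA, hB]
  set l := games.map (fun g => (pvLook g "opening", pvLook g "result")) with hl
  have hndA : ((l.foldl stepA PySem.Dict.empty).keys).Nodup :=
    nodup_keys_foldA _ _ PySem.Dict.nodup_keys_empty
  have hndB : ((l.foldl (fun d p => d.modify p.1 [] (· ++ [p.2])) PySem.Dict.empty).keys).Nodup :=
    PySem.Dict.nodup_keys_foldl_modify_key l (·.1) [] (fun _ p => (· ++ [p.2])) _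
      PySem.Dict.nodup_keys_empty
  rw [PySem.Dict.items_eq_map_keys _ hndA (0, 0),
      PySem.Dict.items_eq_map_keys _ hndB []]
  rw [keys_foldA, PySem.Dict.keys_foldl_modify_key l (·.1) [] (fun _ p => (· ++ [p.2]))]
  simp only [List.map_map]
  refine List.map_congr_left (fun k _ => ?_)
  simp only [Function.comp]
  rw [getD_foldA, PySem.Dict.getD_foldl_modify_append]
  simp [PySem.Dict.getD_empty]

-- ===== VERDICT (by name: the statement is the Claim_ definition above) =====
theorem win_loss_by_opening_spec : Claim_equal_win_loss_by_opening := by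
  intro games _ _
  exact winloss_eq games
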